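-- pv_equiv track=rewrite | github.com/JoshHumpherey/cracking_the_coding_interview | ch10/10_7.py | create_massive_list
-- ===== SOURCE A (Python) =====
-- def create_massive_list(limit, missing_bit):
--     if missing_bit > limit:
--         return None
--     counter = 0
--     very_large_array = []
--     while (counter < limit):
--         if counter != missing_bit-1:
--             very_large_array.append(counter)
--         counter += 1
--     return very_large_array
-- ===== SOURCE B (Python) =====
-- def create_massive_list(limit, missing_bit):
--     if missing_bit > limit:
--         return None
--     if missing_bit <= 0:
--         return list(range(limit))
--     return list(range(missing_bit - 1)) + list(range(missing_bit, limit))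
-- ===== Notes on version B (the rewrite author's own statement) =====
-- stated objective: simpler
-- what changed: Replaces the per-element conditional while-loop with a direct construction from two flat range segments (plus a no-skip range when missing_bit <= 0), removing the loop and the per-element test.
import Mathlib
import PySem

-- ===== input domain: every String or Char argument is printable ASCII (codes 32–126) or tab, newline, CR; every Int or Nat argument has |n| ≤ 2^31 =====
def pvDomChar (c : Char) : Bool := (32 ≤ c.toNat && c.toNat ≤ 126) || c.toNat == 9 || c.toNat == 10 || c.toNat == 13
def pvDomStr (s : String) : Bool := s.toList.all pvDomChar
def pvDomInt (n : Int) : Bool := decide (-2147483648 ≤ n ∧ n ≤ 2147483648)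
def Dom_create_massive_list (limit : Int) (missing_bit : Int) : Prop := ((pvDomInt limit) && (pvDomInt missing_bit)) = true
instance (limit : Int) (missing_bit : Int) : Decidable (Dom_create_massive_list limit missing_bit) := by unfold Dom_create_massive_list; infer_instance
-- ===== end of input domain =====

-- B builds the result from two flat range segments instead of A's per-element conditional loop (objective: simpler).

-- ===== PORT A =====
-- while (counter < limit): step counter, appending counter unless it equals missing_bit-1
def cmlLoop (limit : Int) (missing_bit : Int) (counter : Int) (acc : List Int) : List Int :=
  if h : counter < limit then
    cmlLoop limit missing_bit (counter + 1)
      (if counter ≠ missing_bit - 1 then acc ++ [counter] else acc)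
  else acc
termination_by (limit - counter).toNat
decreasing_by omega

def create_massive_list (limit : Int) (missing_bit : Int) : Option (List Int) :=
  if missing_bit > limit then none
  else some (cmlLoop limit missing_bit 0 [])

-- ===== PORT B =====
def create_massive_list_alt (limit : Int) (missing_bit : Int) : Option (List Int) :=
  if missing_bit > limit then none
  else if missing_bit ≤ 0 then some (PySem.List.pyRange 0 limit 1)
  else some (PySem.List.pyRange 0 (missing_bit - 1) 1 ++ PySem.List.pyRange missing_bit limit 1)

-- ===== PRECONDITION & SPEC =====
def Spec_create_massive_list (limit : Int) (missing_bit : Int) (out : Option (List Int)) : Prop := out = create_massive_list_alt limit missing_bit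
instance (limit : Int) (missing_bit : Int) (out : Option (List Int)) : Decidable (Spec_create_massive_list limit missing_bit out) := by unfold Spec_create_massive_list; infer_instance

-- ===== CLAIM (what is proved, stated in full; the proofs are below) =====
def Claim_equal_create_massive_list : Prop := ∀ (limit : Int) (missing_bit : Int), Dom_create_massive_list limit missing_bit → Spec_create_massive_list limit missing_bit (create_massive_list limit missing_bit)

-- ===== LEMMAS AND PROOFS =====

theorem cmlLoop_eq_filter (limit missing_bit : Int) : ∀ (counter : Int) (acc : List Int),
    cmlLoop limit missing_bit counter acc
      = acc ++ (PySem.List.pyRange counter limit 1).filter (fun x => decide (x ≠ missing_bit - 1)) := by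
  intro counter acc
  generalize hn : (limit - counter).toNat = n
  induction n generalizing counter acc with
  | zero =>
    have h : ¬ counter < limit := by omega
    rw [cmlLoop, dif_neg h, PySem.List.pyRange_one_eq_nil (by omega)]
    simp
  | succ n ih =>
    by_cases h : counter < limit
    · rw [cmlLoop, dif_pos h, ih _ _ (by omega), PySem.List.pyRange_one_cons h]
      by_cases hc : counter = missing_bit - 1 <;> simp [hc]
    · rw [cmlLoop, dif_neg h, PySem.List.pyRange_one_eq_nil (by omega)]
      simp

theorem filter_pyRange_split (limit missing_bit : Int) (hle : missing_bit ≤ limit) (hpos : 0 < missing_bit) :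
    (PySem.List.pyRange 0 limit 1).filter (fun x => decide (x ≠ missing_bit - 1))
      = PySem.List.pyRange 0 (missing_bit - 1) 1 ++ PySem.List.pyRange missing_bit limit 1 := by
  rw [PySem.List.pyRange_one_append 0 (missing_bit - 1) limit (by omega) (by omega),
      PySem.List.pyRange_one_cons (a := missing_bit - 1) (by omega)]
  rw [List.filter_append]
  have h1 : (PySem.List.pyRange 0 (missing_bit - 1) 1).filter (fun x => decide (x ≠ missing_bit - 1))
      = PySem.List.pyRange 0 (missing_bit - 1) 1 := by
    apply List.filter_eq_self.2
    intro x hx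
    have := (PySem.List.mem_pyRange_one).1 hx
    simp; omega
  have h2 : ((missing_bit - 1) :: PySem.List.pyRange (missing_bit - 1 + 1) limit 1).filter (fun x => decide (x ≠ missing_bit - 1))
      = PySem.List.pyRange missing_bit limit 1 := by
    have hm : missing_bit - 1 + 1 = missing_bit := by omega
    rw [hm, List.filter_cons]
    have hfalse : (decide (missing_bit - 1 ≠ missing_bit - 1)) = false := by simp
    rw [hfalse]
    simp only [Bool.false_eq_true, if_false]
    apply List.filter_eq_self.2
    intro x hx
    have := (PySem.List.mem_pyRange_one).1 hx
    simp; omega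
  rw [h1, h2]

theorem filter_pyRange_nonpos (limit missing_bit : Int) (hnp : missing_bit ≤ 0) :
    (PySem.List.pyRange 0 limit 1).filter (fun x => decide (x ≠ missing_bit - 1))
      = PySem.List.pyRange 0 limit 1 := by
  apply List.filter_eq_self.2
  intro x hx
  have := (PySem.List.mem_pyRange_one).1 hx
  simp; omega

-- ===== VERDICT (by name: the statement is the Claim_ definition above) =====
theorem create_massive_list_spec : Claim_equal_create_massive_list := by
  intro limit missing_bit _
  unfold Spec_create_massive_list create_massive_list create_massive_list_alt
  by_cases hg : missing_bit > limit
  · rw [if_pos hg, if_pos hg]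
  · rw [if_neg hg, if_neg hg, cmlLoop_eq_filter, List.nil_append]
    by_cases hnp : missing_bit ≤ 0
    · rw [if_pos hnp, filter_pyRange_nonpos limit missing_bit hnp]
    · rw [if_neg hnp, filter_pyRange_split limit missing_bit (by omega) (by omega)]
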